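-- pv_equiv track=rewrite | github.com/Johnson-Family-Dynasty/vibe | bot.py | infer_user_mode
-- ===== SOURCE A (Python) =====
-- def infer_user_mode(member_roles: list[str]) -> str:
--     lowered_roles = [role.lower() for role in member_roles]
--
--     if any("admin" in role for role in lowered_roles):
--         return "admin"
--
--     if any(keyword in role for role in lowered_roles for keyword in ("teacher", "parent", "staff", "mod", "moderator")):
--         return "teacher/staff"
--
--     if any(keyword in role for role in lowered_roles for keyword in ("student", "learner", "kid")):
--         return "student"
--
--     return "unknown"
-- ===== SOURCE B (Python) =====
-- _KEYWORD_MODES = [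
--     ("admin", "admin"),
--     ("teacher", "teacher/staff"),
--     ("parent", "teacher/staff"),
--     ("staff", "teacher/staff"),
--     ("mod", "teacher/staff"),
--     ("moderator", "teacher/staff"),
--     ("student", "student"),
--     ("learner", "student"),
--     ("kid", "student"),
-- ]
--
-- def infer_user_mode(member_roles: list[str]) -> str:
--     matched = set()
--     for role in member_roles:
--         low = role.lower()
--         for keyword, mode in _KEYWORD_MODES:
--             if keyword in low:
--                 matched.add(mode)
--     for mode in ("admin", "teacher/staff", "student"):
--         if mode in matched:
--             return mode
--     return "unknown"
-- ===== Notes on version B (the rewrite author's own statement) =====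
-- stated objective: alternative
-- what changed: Three independent short-circuiting any-scans over the lowered roles are replaced by a single pass that collects every matched mode into a set via a keyword-to-mode table, followed by a fixed priority walk over the three modes.
import Mathlib
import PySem

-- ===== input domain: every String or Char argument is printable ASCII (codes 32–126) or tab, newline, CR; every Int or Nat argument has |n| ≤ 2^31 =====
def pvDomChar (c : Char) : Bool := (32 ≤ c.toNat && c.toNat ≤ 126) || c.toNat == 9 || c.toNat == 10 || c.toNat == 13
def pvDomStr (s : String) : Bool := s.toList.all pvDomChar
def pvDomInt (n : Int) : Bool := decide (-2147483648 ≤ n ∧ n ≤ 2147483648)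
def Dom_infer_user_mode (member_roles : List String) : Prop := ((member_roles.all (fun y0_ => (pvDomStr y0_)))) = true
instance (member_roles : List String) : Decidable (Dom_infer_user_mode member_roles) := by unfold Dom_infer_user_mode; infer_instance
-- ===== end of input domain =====

-- B replaces A's three short-circuiting any-scans with one pass building a set of matched
-- modes from a keyword→mode table, then a fixed priority walk (objective: alternative decomposition).

-- ===== PORT A =====
def infer_user_mode (member_roles : List String) : String :=
  let lowered_roles := member_roles.map (fun role => PySem.Str.lower role)
  if lowered_roles.any (fun role => PySem.Str.isIn "admin" role) then "admin"
  else if lowered_roles.any (fun role =>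
      (["teacher", "parent", "staff", "mod", "moderator"] : List String).any
        (fun keyword => PySem.Str.isIn keyword role)) then "teacher/staff"
  else if lowered_roles.any (fun role =>
      (["student", "learner", "kid"] : List String).any
        (fun keyword => PySem.Str.isIn keyword role)) then "student"
  else "unknown"

-- ===== PORT B =====
def pvKeywordModes : List (String × String) :=
  [("admin", "admin"),
   ("teacher", "teacher/staff"), ("parent", "teacher/staff"), ("staff", "teacher/staff"),
   ("mod", "teacher/staff"), ("moderator", "teacher/staff"),
   ("student", "student"), ("learner", "student"), ("kid", "student")]

def pvStep (s : PySem.Set String) (role : String) : PySem.Set String :=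
  let low := PySem.Str.lower role
  pvKeywordModes.foldl (fun s p => if PySem.Str.isIn p.1 low then PySem.Set.add s p.2 else s) s

def infer_user_mode_alt (member_roles : List String) : String :=
  let matched := member_roles.foldl pvStep PySem.Set.empty
  if PySem.Set.contains matched "admin" then "admin"
  else if PySem.Set.contains matched "teacher/staff" then "teacher/staff"
  else if PySem.Set.contains matched "student" then "student"
  else "unknown"

-- ===== PRECONDITION & SPEC =====
def Spec_infer_user_mode (member_roles : List String) (out : String) : Prop := out = infer_user_mode_alt member_roles
instance (member_roles : List String) (out : String) : Decidable (Spec_infer_user_mode member_roles out) := by unfold Spec_infer_user_mode; infer_instance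

-- ===== CLAIM (what is proved, stated in full; the proofs are below) =====
def Claim_equal_infer_user_mode : Prop := ∀ (member_roles : List String), Dom_infer_user_mode member_roles → Spec_infer_user_mode member_roles (infer_user_mode member_roles)

-- ===== LEMMAS AND PROOFS =====

theorem mem_innerFold (kws : List (String × String)) (low : String) (s : PySem.Set String)
    (m : String) :
    m ∈ kws.foldl (fun s p => if PySem.Str.isIn p.1 low then PySem.Set.add s p.2 else s) s ↔
      m ∈ s ∨ ∃ p ∈ kws, PySem.Str.isIn p.1 low = true ∧ p.2 = m := by
  induction kws generalizing s with
  | nil => simp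
  | cons p rest ih =>
    simp only [List.foldl_cons, List.exists_mem_cons_iff]
    by_cases h : PySem.Str.isIn p.1 low = true
    · rw [if_pos h, ih, PySem.Set.mem_add]
      constructor
      · rintro (⟨hs | he⟩ | hr)
        · exact Or.inl hs
        · exact Or.inr (Or.inl ⟨h, he.symm⟩)
        · exact Or.inr (Or.inr hr)
      · rintro (hs | ⟨_, he⟩ | hr)
        · exact Or.inl (Or.inl hs)
        · exact Or.inl (Or.inr he.symm)
        · exact Or.inr hr
    · rw [if_neg h, ih]
      constructor
      · rintro (hs | hr)
        · exact Or.inl hs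
        · exact Or.inr (Or.inr hr)
      · rintro (hs | ⟨hi, _⟩ | hr)
        · exact Or.inl hs
        · exact absurd hi h
        · exact Or.inr hr

theorem mem_matched (roles : List String) (s : PySem.Set String) (m : String) :
    m ∈ roles.foldl pvStep s ↔
      m ∈ s ∨ ∃ r ∈ roles, ∃ p ∈ pvKeywordModes,
        PySem.Str.isIn p.1 (PySem.Str.lower r) = true ∧ p.2 = m := by
  induction roles generalizing s with
  | nil => simp
  | cons r rest ih =>
    simp only [List.foldl_cons, ih, pvStep, mem_innerFold, List.exists_mem_cons_iff]
    rw [or_assoc]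

theorem contains_matched (roles : List String) (m : String) :
    PySem.Set.contains (roles.foldl pvStep PySem.Set.empty) m = true ↔
      ∃ r ∈ roles, ∃ p ∈ pvKeywordModes,
        PySem.Str.isIn p.1 (PySem.Str.lower r) = true ∧ p.2 = m := by
  rw [PySem.Set.contains_iff, mem_matched]
  simp [PySem.Set.empty]

theorem condAdmin (roles : List String) :
    (roles.map (fun role => PySem.Str.lower role)).any (fun role => PySem.Str.isIn "admin" role) =
      PySem.Set.contains (roles.foldl pvStep PySem.Set.empty) "admin" := by
  apply Bool.eq_iff_iff.mpr
  rw [Bool.coe_iff_coe.symm] at *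
  rw [contains_matched]
  simp [List.any_eq_true, pvKeywordModes]

theorem condStaff (roles : List String) :
    (roles.map (fun role => PySem.Str.lower role)).any (fun role =>
      (["teacher", "parent", "staff", "mod", "moderator"] : List String).any
        (fun keyword => PySem.Str.isIn keyword role)) =
      PySem.Set.contains (roles.foldl pvStep PySem.Set.empty) "teacher/staff" := by
  apply Bool.eq_iff_iff.mpr
  rw [Bool.coe_iff_coe.symm] at *
  rw [contains_matched]
  simp [List.any_eq_true, pvKeywordModes]

theorem condStudent (roles : List String) :
    (roles.map (fun role => PySem.Str.lower role)).any (fun role =>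
      (["student", "learner", "kid"] : List String).any
        (fun keyword => PySem.Str.isIn keyword role)) =
      PySem.Set.contains (roles.foldl pvStep PySem.Set.empty) "student" := by
  apply Bool.eq_iff_iff.mpr
  rw [Bool.coe_iff_coe.symm] at *
  rw [contains_matched]
  simp [List.any_eq_true, pvKeywordModes]

-- ===== VERDICT (by name: the statement is the Claim_ definition above) =====
theorem infer_user_mode_spec : Claim_equal_infer_user_mode := by
  intro roles _
  show infer_user_mode roles = infer_user_mode_alt roles
  unfold infer_user_mode infer_user_mode_alt
  simp only [condAdmin, condStaff, condStudent]
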